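-- pv_equiv track=rewrite | github.com/straczowski/pyaudio-fft-websocket-server | src/find_freq_indicies.py | find_freq_indicies
-- ===== SOURCE A (Python) =====
-- def find_freq_indicies(freq_range, freqs):
--     start = freq_range[0]
--     end = freq_range[1]
--     start_idx = -1
--     end_idx = -1
--     for i, freq in enumerate(freqs):
--         if (freq >= start) and (start_idx < 0):
--             start_idx = i
--         if (freq >= end) and (end_idx < 0):
--             end_idx = i
--         if (start_idx >= 0) and (end_idx >= 0):
--             break
--     return start_idx, end_idx
-- ===== SOURCE B (Python) =====
-- def find_freq_indicies(freq_range, freqs):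
--     start = freq_range[0]
--     end = freq_range[1]
--     start_idx = -1
--     end_idx = -1
--     # single backwards pass: overwrite, so the smallest matching index wins
--     for i in range(len(freqs) - 1, -1, -1):
--         f = freqs[i]
--         if f >= start:
--             start_idx = i
--         if f >= end:
--             end_idx = i
--     return start_idx, end_idx
-- ===== Notes on version B (the rewrite author's own statement) =====
-- stated objective: alternative
-- what changed: Replaces the forward scan with state guards ('only set if still -1') and an early break by a single guard-free backwards pass whose overwrites make the first matching index win.
import Mathlib
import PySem

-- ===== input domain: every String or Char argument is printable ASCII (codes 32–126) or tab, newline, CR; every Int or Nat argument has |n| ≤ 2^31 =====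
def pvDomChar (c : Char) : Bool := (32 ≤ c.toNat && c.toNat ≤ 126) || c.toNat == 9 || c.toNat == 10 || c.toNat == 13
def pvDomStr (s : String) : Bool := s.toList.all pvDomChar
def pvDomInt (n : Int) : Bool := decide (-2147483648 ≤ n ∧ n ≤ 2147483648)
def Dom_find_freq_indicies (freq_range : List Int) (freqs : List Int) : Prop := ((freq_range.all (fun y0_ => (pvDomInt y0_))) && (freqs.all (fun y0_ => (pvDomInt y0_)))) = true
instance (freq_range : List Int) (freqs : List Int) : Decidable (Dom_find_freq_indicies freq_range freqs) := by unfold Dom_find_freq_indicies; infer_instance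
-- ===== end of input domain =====

-- B replaces A's guarded forward scan with early break by a guard-free backwards
-- pass (overwrites, so the first matching index wins); same cost, alternative structure.
-- Python returns a 2-tuple; both ports render it as the 2-element list [start_idx, end_idx].

-- ===== PORT A =====
-- forward loop over enumerate(freqs) with the two '< 0' guards and the break
def goA (s e : Int) (i : Nat) (si ei : Int) : List Int → Int × Int
  | [] => (si, ei)
  | f :: rest =>
    let si' := if f ≥ s ∧ si < 0 then (i : Int) else si
    let ei' := if f ≥ e ∧ ei < 0 then (i : Int) else ei
    if si' ≥ 0 ∧ ei' ≥ 0 then (si', ei') else goA s e (i + 1) si' ei' rest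

def find_freq_indicies (freq_range : List Int) (freqs : List Int) : List Int :=
  match PySem.List.pyGet? freq_range 0, PySem.List.pyGet? freq_range 1 with
  | some s, some e =>
    let r := goA s e 0 (-1) (-1) freqs
    [r.1, r.2]
  | _, _ => []  -- Python raises IndexError here; outside Pre_

-- ===== PORT B =====
-- backwards loop: the suffix is processed first, the head overwrites last
def goB (s e : Int) (i : Nat) : List Int → Int × Int
  | [] => (-1, -1)
  | f :: rest =>
    let r := goB s e (i + 1) rest
    (if f ≥ s then (i : Int) else r.1, if f ≥ e then (i : Int) else r.2)

def find_freq_indicies_alt (freq_range : List Int) (freqs : List Int) : List Int :=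
  match freq_range with
  | s :: e :: _ =>
    let r := goB s e 0 freqs
    [r.1, r.2]
  | _ => []  -- Python raises IndexError here; outside Pre_

-- ===== PRECONDITION & SPEC =====
-- A (and B) index freq_range[0] and freq_range[1]: IndexError unless it has ≥ 2 elements
def Pre_find_freq_indicies (freq_range : List Int) (freqs : List Int) : Prop :=
  2 ≤ freq_range.length
instance (freq_range : List Int) (freqs : List Int) : Decidable (Pre_find_freq_indicies freq_range freqs) := by unfold Pre_find_freq_indicies; infer_instance

def pvWitness_find_freq_indicies : List Int × List Int := ([2, 4], [1, 3, 5])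

def Spec_find_freq_indicies (freq_range : List Int) (freqs : List Int) (out : List Int) : Prop := out = find_freq_indicies_alt freq_range freqs
instance (freq_range : List Int) (freqs : List Int) (out : List Int) : Decidable (Spec_find_freq_indicies freq_range freqs out) := by unfold Spec_find_freq_indicies; infer_instance

-- ===== CLAIM (what is proved, stated in full; the proofs are below) =====
def Claim_equal_find_freq_indicies : Prop := ∀ (freq_range : List Int) (freqs : List Int), Dom_find_freq_indicies freq_range freqs → Pre_find_freq_indicies freq_range freqs → Spec_find_freq_indicies freq_range freqs (find_freq_indicies freq_range freqs)

-- ===== LEMMAS AND PROOFS =====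

-- first index i' ≥ i (offset form) with freqs[i'] ≥ t, else -1
def firstGe (t : Int) (i : Nat) : List Int → Int
  | [] => -1
  | f :: rest => if f ≥ t then (i : Int) else firstGe t (i + 1) rest

theorem goB_eq (s e : Int) : ∀ (l : List Int) (i : Nat),
    goB s e i l = (firstGe s i l, firstGe e i l) := by
  intro l
  induction l with
  | nil => intro i; rfl
  | cons f rest ih =>
    intro i
    simp [goB, firstGe, ih (i + 1)]

theorem goA_eq (s e : Int) : ∀ (l : List Int) (i : Nat) (si ei : Int),
    (si = -1 ∨ 0 ≤ si) → (ei = -1 ∨ 0 ≤ ei) →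
    goA s e i si ei l =
      ((if si < 0 then firstGe s i l else si),
       (if ei < 0 then firstGe e i l else ei)) := by
  intro l
  induction l with
  | nil =>
    intro i si ei hsi hei
    rcases hsi with hsi | hsi <;> rcases hei with hei | hei <;>
      simp only [goA, firstGe] <;>
      split_ifs <;> simp only [Prod.mk.injEq] <;> constructor <;> first | trivial | omega
  | cons f rest ih =>
    intro i si ei hsi hei
    have hi : (0 : Int) ≤ (i : Int) := Int.natCast_nonneg i
    rcases hsi with hsi | hsi <;> rcases hei with hei | hei <;>
      simp only [goA, firstGe] <;>
      split_ifs <;>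
      first
      | rfl
      | (simp only [Prod.mk.injEq]; constructor <;> first | rfl | trivial | omega)
      | (rw [ih (i + 1) _ _ (by omega) (by omega)]
         simp only [Prod.mk.injEq]
         constructor <;> split_ifs <;> first | rfl | trivial | omega)

-- ===== VERDICT (by name: the statement is the Claim_ definition above) =====
theorem find_freq_indicies_spec : Claim_equal_find_freq_indicies := by
  intro freq_range freqs _ hpre
  unfold Spec_find_freq_indicies find_freq_indicies find_freq_indicies_alt
  rcases freq_range with _ | ⟨s, _ | ⟨e, rest⟩⟩
  · exact absurd hpre (by simp [Pre_find_freq_indicies])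
  · exact absurd hpre (by simp [Pre_find_freq_indicies])
  · have h0 : PySem.List.pyGet? (s :: e :: rest) 0 = some s :=
      PySem.List.pyGet?_zero_cons s (e :: rest)
    have h1 : PySem.List.pyGet? (s :: e :: rest) 1 = some e := by
      have h : PySem.List.pyGet? (s :: e :: rest) ((1 : Nat) : Int) = some e := PySem.List.pyGet?_ofNat (s :: e :: rest) 1 (by simp)
      exact h
    rw [h0, h1]
    show [(goA s e 0 (-1) (-1) freqs).1, (goA s e 0 (-1) (-1) freqs).2]
        = [(goB s e 0 freqs).1, (goB s e 0 freqs).2]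
    rw [goA_eq _ _ freqs 0 (-1) (-1) (Or.inl rfl) (Or.inl rfl), goB_eq]
    simp
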